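-- pv_equiv track=rewrite | github.com/tyler1zhang/Advanture_of_Code | zengxin/logic.py | cal_all_combination_factors
-- ===== SOURCE A (Python) =====
-- from functools import reduce
-- import itertools
--
-- def cal_all_combination_factors(factor_list):
--     # from the prime factors, get all the factors
--     r = [i for i in factor_list]
--     for k in range(2, len(factor_list)+1):
--         combination = itertools.combinations(factor_list, k)
--         for i in combination:
--             b =  reduce(lambda x, y: x*y, i)
--             r.append(b)
--     return list(set(r))
-- ===== SOURCE B (Python) =====
-- def _picks(lst):
--     # (element, elements strictly after it) for each position, front to back
--     out = []
--     rest = lst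
--     while rest:
--         x, rest = rest[0], rest[1:]
--         out.append((x, rest))
--     return out
--
-- def cal_all_combination_factors(factor_list):
--     # one multiplication per subset: grow a frontier of (product, usable suffix)
--     out = list(factor_list)
--     layer = _picks(factor_list)
--     for _ in range(1, len(factor_list)):
--         layer = [(p * f, rest2) for (p, rest) in layer for (f, rest2) in _picks(rest)]
--         out.extend(p for (p, _) in layer)
--     return list(set(out))
-- ===== Notes on version B (the rewrite author's own statement) =====
-- stated objective: alternative
-- what changed: Replaces the size-by-size itertools.combinations + reduce enumeration (O(k) multiplications per size-k subset) by a single frontier DP: a layer of (product, usable-suffix) pairs is expanded once per size, so each subset product costs one multiplication and no itertools/reduce is used.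
import Mathlib
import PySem

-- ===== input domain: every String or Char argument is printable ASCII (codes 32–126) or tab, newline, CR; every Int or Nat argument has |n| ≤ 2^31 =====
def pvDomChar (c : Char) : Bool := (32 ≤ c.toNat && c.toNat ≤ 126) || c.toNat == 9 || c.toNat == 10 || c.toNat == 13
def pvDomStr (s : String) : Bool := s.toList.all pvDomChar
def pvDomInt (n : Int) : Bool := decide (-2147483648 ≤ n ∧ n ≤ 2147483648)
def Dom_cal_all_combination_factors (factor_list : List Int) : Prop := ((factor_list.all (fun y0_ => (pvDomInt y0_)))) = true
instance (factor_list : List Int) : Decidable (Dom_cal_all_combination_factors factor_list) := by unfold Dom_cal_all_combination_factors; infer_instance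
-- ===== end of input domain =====

-- B replaces the combinations+reduce enumeration by a frontier DP (one multiplication per
-- subset); both Pythons feed the same value sequence into set(), so the return values agree.

-- ===== PORT A =====
-- reduce(lambda x, y: x*y, i): fold of * over the tail, starting from the head.
-- Python's reduce raises on an empty sequence; here every combination has size ≥ 2,
-- so the [] branch (0) is unreachable.
def pyReduceMul : List Int → Int
  | [] => 0
  | x :: xs => xs.foldl (· * ·) x

def cal_all_combination_factors (factor_list : List Int) : List Int :=
  let r := factor_list.map (fun i => i)
  let r := (PySem.List.pyRange 2 ((factor_list.length : Int) + 1) 1).foldl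
    (fun r k =>
      (PySem.List.combinations factor_list k.toNat).foldl
        (fun r i => r ++ [pyReduceMul i]) r) r
  PySem.Set.ofList r

-- ===== PORT B =====
-- _picks(lst): (element, elements strictly after it) for each position, front to back
def pvPicks : List Int → List (Int × List Int)
  | [] => []
  | x :: rest => (x, rest) :: pvPicks rest

-- the layer comprehension of Source B
def pvExpand (layer : List (Int × List Int)) : List (Int × List Int) :=
  layer.flatMap (fun pr => (pvPicks pr.2).map (fun fr => (pr.1 * fr.1, fr.2)))

def cal_all_combination_factors_alt (factor_list : List Int) : List Int :=
  let st := (PySem.List.pyRange 1 (factor_list.length : Int) 1).foldl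
    (fun (st : List Int × List (Int × List Int)) _ =>
      let layer := pvExpand st.2
      (st.1 ++ layer.map Prod.fst, layer))
    (factor_list.map (fun i => i), pvPicks factor_list)
  PySem.Set.ofList st.1

-- ===== PRECONDITION & SPEC =====
def Spec_cal_all_combination_factors (factor_list : List Int) (out : List Int) : Prop := out = cal_all_combination_factors_alt factor_list
instance (factor_list : List Int) (out : List Int) : Decidable (Spec_cal_all_combination_factors factor_list out) := by unfold Spec_cal_all_combination_factors; infer_instance

-- ===== CLAIM (what is proved, stated in full; the proofs are below) =====
def Claim_equal_cal_all_combination_factors : Prop := ∀ (factor_list : List Int), Dom_cal_all_combination_factors factor_list → Spec_cal_all_combination_factors factor_list (cal_all_combination_factors factor_list)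

-- ===== LEMMAS AND PROOFS =====

-- each combination together with the suffix after its last chosen element, same order as combinations
def pvCWR : List Int → Nat → List (List Int × List Int)
  | xs, 0 => [([], xs)]
  | [], _ + 1 => []
  | x :: xs, k + 1 =>
      (pvCWR xs k).map (fun cs => (x :: cs.1, cs.2)) ++ pvCWR xs (k + 1)

theorem pvCWR_fst (xs : List Int) (k : Nat) :
    (pvCWR xs k).map Prod.fst = PySem.List.combinations xs k := by
  induction xs generalizing k with
  | nil =>
      cases k with
      | zero => simp [pvCWR, PySem.List.combinations_zero]
      | succ k => simp [pvCWR, PySem.List.combinations_nil_succ]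
  | cons x xs ih =>
      cases k with
      | zero => simp [pvCWR, PySem.List.combinations_zero]
      | succ k =>
          simp [pvCWR, PySem.List.combinations_cons_succ, ← ih, Function.comp_def]

theorem pvCWR_len (xs : List Int) (k : Nat) :
    ∀ cs ∈ pvCWR xs k, cs.1.length = k := by
  induction xs generalizing k with
  | nil =>
      cases k with
      | zero => simp [pvCWR]
      | succ k => simp [pvCWR]
  | cons x xs ih =>
      cases k with
      | zero => simp [pvCWR]
      | succ k =>
          intro cs hcs
          simp only [pvCWR, List.mem_append, List.mem_map] at hcs
          rcases hcs with ⟨cs', h', rfl⟩ | h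
          · simpa using ih k cs' h'
          · exact ih (k + 1) cs h

theorem pvCWR_one (xs : List Int) :
    pvCWR xs 1 = (pvPicks xs).map (fun fr => ([fr.1], fr.2)) := by
  induction xs with
  | nil => simp [pvCWR, pvPicks]
  | cons x xs ih => simp [pvCWR, pvPicks, ih]

theorem pvCWR_step (xs : List Int) (k : Nat) :
    pvCWR xs (k + 1) =
      (pvCWR xs k).flatMap
        (fun cs => (pvPicks cs.2).map (fun fr => (cs.1 ++ [fr.1], fr.2))) := by
  induction xs generalizing k with
  | nil =>
      cases k with
      | zero => simp [pvCWR, pvPicks]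
      | succ k => simp [pvCWR]
  | cons x xs ih =>
      cases k with
      | zero =>
          simp [pvCWR, pvPicks, pvCWR_one]
      | succ k =>
          simp only [pvCWR, List.flatMap_append, List.flatMap_map]
          rw [ih k, ih (k + 1)]
          simp only [List.map_flatMap]
          rw [← ih k]
          simp [Function.comp_def]

theorem pyReduceMul_append (c : List Int) (f : Int) (hc : c ≠ []) :
    pyReduceMul (c ++ [f]) = pyReduceMul c * f := by
  cases c with
  | nil => exact absurd rfl hc
  | cons x xs => simp [pyReduceMul, List.foldl_append]

-- attaching products, the frontier step realises the size step
theorem pvCWR_expand (xs : List Int) (k : Nat) (hk : k ≠ 0) :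
    (pvCWR xs (k + 1)).map (fun cs => (pyReduceMul cs.1, cs.2)) =
      pvExpand ((pvCWR xs k).map (fun cs => (pyReduceMul cs.1, cs.2))) := by
  rw [pvCWR_step, pvExpand, List.flatMap_map, List.map_flatMap]
  refine List.flatMap_congr (fun cs hcs => ?_)
  rw [List.map_map]
  refine List.map_congr_left (fun fr _ => ?_)
  have hne : cs.1 ≠ [] := by
    have := pvCWR_len xs k cs hcs
    intro h; rw [h] at this; simp at this; omega
  simp [pyReduceMul_append cs.1 fr.1 hne]

-- folding a state-only step m times
theorem pvFoldl_const {σ : Type} (g : σ → σ) (l : List Int) (init : σ) :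
    l.foldl (fun st _ => g st) init = g^[l.length] init := by
  induction l generalizing init with
  | nil => rfl
  | cons x l ih => simp [List.foldl_cons, ih, Function.iterate_succ_apply]

-- the state of B's loop after m iterations
theorem pvIter_eq (xs : List Int) (m : Nat) :
    (fun st => (st.1 ++ (pvExpand st.2).map Prod.fst, pvExpand st.2))^[m]
        (xs, pvPicks xs) =
      (xs ++ (List.range m).flatMap
          (fun t => (PySem.List.combinations xs (t + 2)).map pyReduceMul),
        (pvCWR xs (m + 1)).map (fun cs => (pyReduceMul cs.1, cs.2))) := by
  induction m with
  | zero =>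
      have hone : (pvCWR xs 1).map (fun cs => (pyReduceMul cs.1, cs.2)) = pvPicks xs := by
        rw [pvCWR_one, List.map_map]
        simp [Function.comp_def, pyReduceMul]
      simp [hone]
  | succ m ih =>
      rw [Function.iterate_succ_apply', ih]
      have hstep := pvCWR_expand xs (m + 1) (by omega)
      have hfst : ((pvCWR xs (m + 2)).map (fun cs => (pyReduceMul cs.1, cs.2))).map Prod.fst
          = (PySem.List.combinations xs (m + 2)).map pyReduceMul := by
        rw [List.map_map, ← pvCWR_fst xs (m + 2), List.map_map]
        rfl
      simp only [← hstep, hfst, List.range_succ, List.flatMap_append, List.flatMap_singleton,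
        List.append_assoc]

-- both r-sequences coincide
theorem pvSeq_eq (xs : List Int) :
    (PySem.List.pyRange 2 ((xs.length : Int) + 1) 1).foldl
        (fun r k => (PySem.List.combinations xs k.toNat).foldl
          (fun r i => r ++ [pyReduceMul i]) r) (xs.map (fun i => i)) =
      ((PySem.List.pyRange 1 (xs.length : Int) 1).foldl
        (fun (st : List Int × List (Int × List Int)) _ =>
          let layer := pvExpand st.2
          (st.1 ++ layer.map Prod.fst, layer))
        (xs.map (fun i => i), pvPicks xs)).1 := by
  have hmap : xs.map (fun i => i) = xs := by simp
  rw [hmap]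
  -- A's side: inner append-fold is a map, outer fold is a flatMap
  have hA : ∀ (l : List Int) (r0 : List Int),
      l.foldl (fun r k => (PySem.List.combinations xs k.toNat).foldl
        (fun r i => r ++ [pyReduceMul i]) r) r0
      = r0 ++ l.flatMap (fun k => (PySem.List.combinations xs k.toNat).map pyReduceMul) := by
    intro l r0
    have := PySem.List.foldl_append_eq_flatMap
      (g := fun k : Int => (PySem.List.combinations xs k.toNat).map pyReduceMul)
      (l := l) (acc := r0)
    rw [← this]
    have hfun : (fun (r : List Int) (k : Int) =>
        (PySem.List.combinations xs k.toNat).foldl (fun r i => r ++ [pyReduceMul i]) r)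
        = fun (r : List Int) (k : Int) =>
            r ++ (PySem.List.combinations xs k.toNat).map pyReduceMul := by
      funext r k
      exact PySem.List.foldl_append_singleton_eq_map pyReduceMul _ r
    rw [hfun]
  rw [hA]
  -- B's side: a state-only iteration
  rw [pvFoldl_const (g := fun st : List Int × List (Int × List Int) =>
        (st.1 ++ (pvExpand st.2).map Prod.fst, pvExpand st.2)), pvIter_eq]
  rw [PySem.List.length_pyRange_one, PySem.List.pyRange_one]
  have hlen : (((xs.length : Int) + 1) - 2).toNat = xs.length - 1 := by omega
  have hlen2 : ((xs.length : Int) - 1).toNat = xs.length - 1 := by omega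
  rw [hlen, hlen2, List.flatMap_map]
  congr 1
  refine List.flatMap_congr (fun t ht => ?_)
  have : ((2 : Int) + (t : Int)).toNat = t + 2 := by omega
  rw [this]

-- ===== VERDICT (by name: the statement is the Claim_ definition above) =====
theorem cal_all_combination_factors_spec : Claim_equal_cal_all_combination_factors := by
  intro factor_list _
  unfold Spec_cal_all_combination_factors
  unfold cal_all_combination_factors cal_all_combination_factors_alt
  simp only []
  rw [pvSeq_eq]
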